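-- pv_equiv track=rewrite | github.com/SaVyrin/Languages-and-Programming-Systems | Task2/task.py | sort_list_by_rows
-- ===== SOURCE A (Python) =====
-- def sort_list_by_rows(original_list: list):
--     if len(original_list) == 0:
--         return original_list
--
--     asc_list = []
--     desc_list = []
--     for number_list in original_list:
--         if check_ascending(number_list):
--             asc_list.append(number_list)
--         else:
--             desc_list.append(number_list)
--
--     result_list = asc_list + desc_list
--     return result_list
--
-- def check_ascending(number_list: list):
--     prev_number = number_list[0]
--     for number in number_list[1:]:
--         if prev_number > number:
--             return False
--         prev_number = number
--
--     return True
-- ===== SOURCE B (Python) =====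
-- def sort_list_by_rows(original_list: list):
--     return sorted(original_list,
--                   key=lambda nl: 0 if all(a <= b for a, b in zip(nl, nl[1:])) else 1)
-- ===== Notes on version B (the rewrite author's own statement) =====
-- stated objective: idiomatic
-- what changed: Replaced the two-accumulator partition-and-concatenate loop (with its manual check_ascending scan and empty-list special case) by a single stable sort keyed on a pairwise zip ascending test.
import Mathlib
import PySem

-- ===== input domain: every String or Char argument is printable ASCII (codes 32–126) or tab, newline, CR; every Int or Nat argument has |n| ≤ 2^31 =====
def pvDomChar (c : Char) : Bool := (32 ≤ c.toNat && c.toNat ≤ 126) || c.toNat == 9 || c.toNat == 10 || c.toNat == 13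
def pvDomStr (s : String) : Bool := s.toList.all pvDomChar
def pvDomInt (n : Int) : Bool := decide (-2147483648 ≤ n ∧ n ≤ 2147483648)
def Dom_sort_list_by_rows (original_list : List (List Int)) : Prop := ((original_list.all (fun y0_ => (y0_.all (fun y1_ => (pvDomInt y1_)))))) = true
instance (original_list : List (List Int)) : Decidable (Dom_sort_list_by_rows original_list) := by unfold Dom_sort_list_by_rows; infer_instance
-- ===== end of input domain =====

-- B replaces A's two-accumulator partition loop by one stable sort keyed on a zip-pairwise
-- ascending test (idiomatic); return values agree on all lists whose rows are nonempty.

-- ===== PORT A =====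
-- check_ascending's loop: prev = …; for number in …: if prev > number: return False; prev = number
def checkAscendingLoop (prev : Int) : List Int → Bool
  | [] => true
  | n :: rest => if prev > n then false else checkAscendingLoop n rest

def check_ascending (number_list : List Int) : Bool :=
  match PySem.List.pyGet? number_list 0 with
  | none => true   -- Python raises IndexError here (empty row); excluded by Pre_
  | some prev => checkAscendingLoop prev (PySem.List.slice number_list (some 1) none)

def sort_list_by_rows (original_list : List (List Int)) : List (List Int) :=
  if original_list.length = 0 then original_list
  else
    let p := original_list.foldl
      (fun (acc : List (List Int) × List (List Int)) number_list =>
        if check_ascending number_list then (acc.1 ++ [number_list], acc.2)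
        else (acc.1, acc.2 ++ [number_list])) ([], [])
    p.1 ++ p.2

-- ===== PORT B =====
-- all(a <= b for a, b in zip(nl, nl[1:]))
def ascB (nl : List Int) : Bool :=
  (nl.zip (PySem.List.slice nl (some 1) none)).all (fun p => p.1 ≤ p.2)

def keyB (nl : List Int) : Int := if ascB nl then 0 else 1

def sort_list_by_rows_alt (original_list : List (List Int)) : List (List Int) :=
  PySem.List.sorted original_list keyB

-- ===== PRECONDITION & SPEC =====
-- Pre_ excludes exactly the inputs where A raises IndexError: a row that is the empty list.
def Pre_sort_list_by_rows (original_list : List (List Int)) : Prop :=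
  ∀ row ∈ original_list, row ≠ []
instance (original_list : List (List Int)) : Decidable (Pre_sort_list_by_rows original_list) := by unfold Pre_sort_list_by_rows; infer_instance

def pvWitness_sort_list_by_rows : List (List Int) := [[1, 2], [3, 1], [2, 2]]

def Spec_sort_list_by_rows (original_list : List (List Int)) (out : List (List Int)) : Prop := out = sort_list_by_rows_alt original_list
instance (original_list : List (List Int)) (out : List (List Int)) : Decidable (Spec_sort_list_by_rows original_list out) := by unfold Spec_sort_list_by_rows; infer_instance

-- ===== CLAIM (what is proved, stated in full; the proofs are below) =====
def Claim_equal_sort_list_by_rows : Prop := ∀ (original_list : List (List Int)), Dom_sort_list_by_rows original_list → Pre_sort_list_by_rows original_list → Spec_sort_list_by_rows original_list (sort_list_by_rows original_list)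

-- ===== LEMMAS AND PROOFS =====

-- On a nonempty row, A's early-return scan agrees with B's zip-pairwise test.
theorem checkAscendingLoop_eq_zip (t : List Int) : ∀ prev : Int,
    checkAscendingLoop prev t = ((prev :: t).zip t).all (fun p => p.1 ≤ p.2) := by
  induction t with
  | nil => intro prev; rfl
  | cons n rest ih =>
      intro prev
      simp only [checkAscendingLoop, List.zip_cons_cons, List.all_cons, ih n]
      by_cases h : prev > n
      · have hn : ¬ prev ≤ n := by omega
        simp [h, hn]
      · have hn : prev ≤ n := by omega
        simp [h, hn]

theorem check_ascending_eq_ascB (nl : List Int) (h : nl ≠ []) :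
    check_ascending nl = ascB nl := by
  cases nl with
  | nil => exact absurd rfl h
  | cons x t =>
      simp only [check_ascending, ascB, PySem.List.slice_from_one, List.tail_cons,
        PySem.List.pyGet?, PySem.List.pyIdx?]
      simpa using checkAscendingLoop_eq_zip t x

-- A's partition fold, characterised by filters.
theorem foldl_partition (p : List Int → Bool) (xs a d : List (List Int)) :
    xs.foldl (fun (acc : List (List Int) × List (List Int)) nl =>
        if p nl then (acc.1 ++ [nl], acc.2) else (acc.1, acc.2 ++ [nl])) (a, d)
      = (a ++ xs.filter p, d ++ xs.filter (fun x => ¬ p x)) := by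
  induction xs generalizing a d with
  | nil => simp
  | cons x t ih =>
      by_cases hx : p x <;>
        simp [List.foldl_cons, hx, ih]

-- Inserting into "all-zero-key ++ all-one-key" keeps the shape.
theorem insertBy_keyB_append (x : List Int) (A D : List (List Int))
    (hA : ∀ a ∈ A, ¬ keyB x < keyB a) (hD : ∀ dd ∈ D, keyB x < keyB dd) :
    PySem.List.insertBy (fun a b => decide (keyB a < keyB b)) x (A ++ D) = A ++ x :: D := by
  induction A with
  | nil =>
      cases D with
      | nil => rfl
      | cons dd D' =>
          simp [PySem.List.insertBy, hD dd (by simp)]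
  | cons a A' ih =>
      have hax : ¬ keyB x < keyB a := hA a (by simp)
      simp only [List.cons_append, PySem.List.insertBy, decide_eq_true_eq]
      rw [if_neg hax, ih (fun b hb => hA b (by simp [hb]))]

-- B's stable insertion sort on a two-valued key is the stable partition.
theorem foldl_insertBy_partition (xs : List (List Int)) : ∀ (A D : List (List Int)),
    (∀ a ∈ A, keyB a = 0) → (∀ dd ∈ D, keyB dd = 1) →
    xs.foldl (fun acc x => PySem.List.insertBy (fun a b => decide (keyB a < keyB b)) x acc) (A ++ D)
      = (A ++ xs.filter (fun x => keyB x = 0)) ++ (D ++ xs.filter (fun x => keyB x = 1)) := by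
  induction xs with
  | nil => intro A D _ _; simp
  | cons x t ih =>
      intro A D hA hD
      have hx : keyB x = 0 ∨ keyB x = 1 := by
        unfold keyB; by_cases h : ascB x <;> simp [h]
      simp only [List.foldl_cons]
      rcases hx with h0 | h1
      · rw [insertBy_keyB_append x A D
            (fun a ha => by rw [hA a ha, h0]; omega)
            (fun dd hd => by rw [hD dd hd, h0]; omega)]
        have := ih (A ++ [x]) D
          (by intro a ha; rcases List.mem_append.1 ha with h | h
              · exact hA a h
              · simp at h; subst h; exact h0) hD
        simpa [List.filter_cons, h0] using this
      · have : PySem.List.insertBy (fun a b => decide (keyB a < keyB b)) x (A ++ D)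
            = (A ++ D) ++ [x] := by
          apply PySem.List.insertBy_of_forall_not_before
          intro y hy
          rcases List.mem_append.1 hy with h | h
          · simp [hA y h, h1]
          · simp [hD y h, h1]
        rw [this, List.append_assoc]
        have := ih A (D ++ [x]) hA
          (by intro dd hd; rcases List.mem_append.1 hd with h | h
              · exact hD dd h
              · simp at h; subst h; exact h1)
        simp only [List.filter_cons, h1] at this ⊢
        simpa using this

theorem sorted_keyB_eq_partition (xs : List (List Int)) :
    PySem.List.sorted xs keyB
      = xs.filter (fun x => keyB x = 0) ++ xs.filter (fun x => keyB x = 1) := by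
  rw [PySem.List.sorted_eq_foldl_insertBy]
  simpa using foldl_insertBy_partition xs [] [] (by simp) (by simp)

-- ===== VERDICT (by name: the statement is the Claim_ definition above) =====
theorem sort_list_by_rows_spec : Claim_equal_sort_list_by_rows := by
  intro xs _ hpre
  unfold Spec_sort_list_by_rows sort_list_by_rows sort_list_by_rows_alt
  rw [sorted_keyB_eq_partition]
  by_cases hnil : xs.length = 0
  · have : xs = [] := List.length_eq_zero_iff.1 hnil
    simp [this]
  · rw [if_neg hnil, foldl_partition]
    simp only [List.nil_append]
    congr 1
    · apply List.filter_congr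
      intro x hx
      simp [check_ascending_eq_ascB x (hpre x hx), keyB]
    · apply List.filter_congr
      intro x hx
      simp [check_ascending_eq_ascB x (hpre x hx), keyB]
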